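-- pv_equiv track=rewrite | github.com/nikhilvas123/file-info-py | file_details.py | count_each_alphabets
-- ===== SOURCE A (Python) =====
-- import collections
--
-- def lines_to_characters(lines):
--     ''' Flattens the list to have characters'''
--     chars = [char for line in lines for word in line.strip("\n") for char in word]
--     return chars
--
-- def count_each_alphabets(lines):
--     ''' Returns the number of each alphabet '''
--     each_alphabet_count = {}
--     chars = lines_to_characters(lines)
--     for char in chars:
--         if char.isalpha():
--             if char.lower() in each_alphabet_count.keys():
--                 each_alphabet_count[char.lower()] += 1
--             else:
--                 each_alphabet_count[char.lower()] = 1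
--     return collections.OrderedDict(sorted(each_alphabet_count.items()))
-- ===== SOURCE B (Python) =====
-- import collections
--
-- def count_each_alphabets(lines):
--     ''' Returns the number of each alphabet (sort-then-group instead of dict counting) '''
--     letters = sorted(c.lower() for line in lines for c in line.strip("\n") if c.isalpha())
--     result = collections.OrderedDict()
--     i, n = 0, len(letters)
--     while i < n:
--         j = i
--         while j < n and letters[j] == letters[i]:
--             j += 1
--         result[letters[i]] = j - i
--         i = j
--     return result
-- ===== Notes on version B (the rewrite author's own statement) =====
-- stated objective: alternative
-- what changed: Replaces incremental dict counting followed by sorting the items with a sort-then-scan pass: the lowercased alphabetic characters are collected, sorted, and consecutive runs of equal characters are grouped into (letter, run-length) pairs, so no counting dictionary is ever built.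
import Mathlib
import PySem

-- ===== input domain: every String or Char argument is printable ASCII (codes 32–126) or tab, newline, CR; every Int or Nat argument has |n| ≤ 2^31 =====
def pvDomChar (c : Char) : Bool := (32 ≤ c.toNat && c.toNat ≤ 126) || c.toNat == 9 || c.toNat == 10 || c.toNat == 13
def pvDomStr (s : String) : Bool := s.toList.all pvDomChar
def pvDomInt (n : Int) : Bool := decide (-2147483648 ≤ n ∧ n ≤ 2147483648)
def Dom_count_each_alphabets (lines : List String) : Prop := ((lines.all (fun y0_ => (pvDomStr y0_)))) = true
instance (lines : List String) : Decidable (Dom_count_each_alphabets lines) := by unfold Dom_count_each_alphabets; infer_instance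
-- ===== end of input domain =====

-- B replaces A's incremental dict counting + item sort by a sort-then-group scan over the
-- lowercased alphabetic characters (objective: alternative, similar cost).

-- ===== PORT A =====
-- a one-character Python string is modelled as a Char; its .isalpha()/.lower() are
-- PySem.Chars.isalpha / PySem.Chars.lowerChar, exact on the ASCII domain
def lines_to_characters (lines : List String) : List Char :=
  lines.flatMap (fun line => (PySem.Str.stripChars line "\n").toList.flatMap (fun word => [word]))

def count_each_alphabets (lines : List String) : List (String × Int) :=
  let chars := lines_to_characters lines
  let d := chars.foldl (fun d char =>
    if PySem.Chars.isalpha char then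
      if d.contains (String.ofList [PySem.Chars.lowerChar char]) then
        d.insert (String.ofList [PySem.Chars.lowerChar char])
          (d.getD (String.ofList [PySem.Chars.lowerChar char]) 0 + 1)
      else
        d.insert (String.ofList [PySem.Chars.lowerChar char]) 1
    else d) PySem.Dict.empty
  (PySem.Dict.ofList (PySem.List.sorted2 d.items (fun p => p.1) (fun p => p.2))).items

-- ===== PORT B =====
-- the grouping while-loop of Source B: one run (takeWhile = the inner scan) per distinct letter
def pvRuns : List Char → List (String × Int)
  | [] => []
  | c :: rest =>
    (String.ofList [c], ((rest.takeWhile (fun x => x == c)).length : Int) + 1) ::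
      pvRuns (rest.dropWhile (fun x => x == c))
termination_by l => l.length
decreasing_by simpa using Nat.lt_succ_of_le (List.length_dropWhile_le _ _)

def count_each_alphabets_alt (lines : List String) : List (String × Int) :=
  let letters := lines.flatMap (fun line =>
    ((PySem.Str.stripChars line "\n").toList.filter PySem.Chars.isalpha).map PySem.Chars.lowerChar)
  (PySem.Dict.ofList (pvRuns (PySem.List.sorted letters (fun c => c) false))).items

-- ===== PRECONDITION & SPEC =====
def Spec_count_each_alphabets (lines : List String) (out : List (String × Int)) : Prop := out = count_each_alphabets_alt lines
instance (lines : List String) (out : List (String × Int)) : Decidable (Spec_count_each_alphabets lines out) := by unfold Spec_count_each_alphabets; infer_instance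

-- ===== CLAIM (what is proved, stated in full; the proofs are below) =====
def Claim_equal_count_each_alphabets : Prop := ∀ (lines : List String), Dom_count_each_alphabets lines → Spec_count_each_alphabets lines (count_each_alphabets lines)

-- ===== LEMMAS AND PROOFS =====

-- keys: one-character strings compare and identify exactly like their character
lemma pvSingle_inj : Function.Injective (fun c : Char => String.ofList [c]) := by
  intro a b h
  have := congrArg String.toList h
  simpa using this

lemma pvSingle_lt_iff (a b : Char) : String.ofList [a] < String.ofList [b] ↔ a < b := by
  rw [String.lt_iff_toList_lt]
  simp only [String.toList_ofList]
  rw [show (([a] : List Char) < [b]) = ([a].lt [b]) from rfl, List.lt_iff_lex_lt]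
  constructor
  · intro h
    cases h with
    | rel h => exact h
    | cons h => cases h
  · exact fun h => List.Lex.rel h

-- insertBy only looks at comparisons between the inserted element and members of the list
lemma pvInsertBy_congr {α : Type} (f g : α → α → Bool) (x : α) :
    ∀ acc : List α, (∀ b ∈ acc, f x b = g x b) →
      PySem.List.insertBy f x acc = PySem.List.insertBy g x acc := by
  intro acc
  induction acc with
  | nil => intro _; rfl
  | cons y ys ih =>
    intro h
    simp only [PySem.List.insertBy]
    rw [h y (by simp)]
    split
    · rfl
    · rw [ih (fun b hb => h b (by simp [hb]))]

lemma pvFoldl_insertBy_congr {α : Type} (f g : α → α → Bool) :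
    ∀ (xs acc : List α),
      (∀ x ∈ xs, ∀ b ∈ acc, f x b = g x b) →
      (∀ x ∈ xs, ∀ y ∈ xs, x ≠ y → f x y = g x y) →
      xs.Nodup →
      xs.foldl (fun acc x => PySem.List.insertBy f x acc) acc
        = xs.foldl (fun acc x => PySem.List.insertBy g x acc) acc := by
  intro xs
  induction xs with
  | nil => intro _ _ _ _; rfl
  | cons x xs ih =>
    intro acc hacc hpair hnd
    simp only [List.foldl_cons]
    rw [pvInsertBy_congr f g x acc (fun b hb => hacc x (by simp) b hb)]
    apply ih
    · intro x' hx' b hb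
      rcases (PySem.List.mem_insertBy g x b acc).1 hb with hb | hb
      · rw [hb]
        exact hpair x' (by simp [hx']) x (by simp)
          (fun hxx => (List.nodup_cons.1 hnd).1 (hxx ▸ hx'))
      · exact hacc x' (by simp [hx']) b hb
    · intro a ha b hb hab; exact hpair a (by simp [ha]) b (by simp [hb]) hab
    · exact (List.nodup_cons.1 hnd).2

-- with pairwise-distinct first components, Python's tuple sort is a sort by the first component
lemma pvSorted2_eq_sorted_fst (M : List (String × Int)) (hnd : (M.map (fun p => p.1)).Nodup) :
    PySem.List.sorted2 M (fun p => p.1) (fun p => p.2)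
      = PySem.List.sorted M (fun p => p.1) := by
  rw [PySem.List.sorted_eq_foldl_insertBy]
  show M.foldl (fun acc x => PySem.List.insertBy _ x acc) [] = _
  apply pvFoldl_insertBy_congr
  · intro _ _ b hb; cases hb
  · intro a ha b hb hab
    have h1 : a.1 ≠ b.1 := fun h => hab (by
      have := List.inj_on_of_nodup_map hnd ha hb h
      exact this)
    rcases lt_or_gt_of_ne h1 with h | h
    · simp [h, not_lt_of_gt h]
    · simp [h, not_lt_of_gt h]
  · exact hnd.of_map

-- the counting loop of A is Counter over the lowercased alphabetic characters (as 1-char keys)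
lemma pvA_dict_eq (chars : List Char) :
    chars.foldl (fun d char =>
      if PySem.Chars.isalpha char then
        if d.contains (String.ofList [PySem.Chars.lowerChar char]) then
          d.insert (String.ofList [PySem.Chars.lowerChar char])
            (d.getD (String.ofList [PySem.Chars.lowerChar char]) 0 + 1)
        else
          d.insert (String.ofList [PySem.Chars.lowerChar char]) 1
      else d) PySem.Dict.empty
    = PySem.Dict.counter
        ((chars.filter PySem.Chars.isalpha).map
          (fun c => String.ofList [PySem.Chars.lowerChar c])) := by
  rw [PySem.List.foldl_if_eq_foldl_filter, ← PySem.Dict.foldl_insert_getD_add_one_eq_counter,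
    List.foldl_map]
  apply PySem.List.foldl_congr_mem
  intro d c _
  by_cases hc : d.contains (String.ofList [PySem.Chars.lowerChar c]) = true
  · simp [hc]
  · simp only [Bool.not_eq_true] at hc
    rw [if_neg (by simp [hc]), PySem.Dict.getD_of_not_contains _ _ hc]
    norm_num

-- filter commutes with set construction
lemma pvOfList_filter (p : Char → Bool) (xs : List Char) :
    PySem.Set.ofList (xs.filter p) = (PySem.Set.ofList xs).filter p := by
  induction xs with
  | nil => rfl
  | cons x xs ih =>
    by_cases hp : p x
    · rw [List.filter_cons_of_pos hp, PySem.Set.ofList_cons, PySem.Set.ofList_cons, ih]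
      simp only [PySem.Set.discard, List.filter_cons_of_pos hp, List.filter_filter]
      congr 1
      apply List.filter_congr
      intro y _; rw [Bool.and_comm]
    · rw [List.filter_cons_of_neg (by simp [hp]), PySem.Set.ofList_cons, ih,
        PySem.Set.discard, List.filter_cons_of_neg (by simp [hp]), List.filter_filter]
      apply List.filter_congr
      intro y _
      by_cases hpy : p y = true
      · have hyx : (y == x) = false := beq_eq_false_iff_ne.2
          (fun h => absurd (h ▸ hpy) (by simp [hp]))
        simp [hpy, hyx]
      · have hpy' : p y = false := by simpa using hpy
        simp [hpy']

-- injective maps commute with set construction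
lemma pvOfList_map_inj (f : Char → String) (hf : Function.Injective f) (xs : List Char) :
    PySem.Set.ofList (xs.map f) = (PySem.Set.ofList xs).map f := by
  induction xs with
  | nil => rfl
  | cons x xs ih =>
    rw [List.map_cons, PySem.Set.ofList_cons, PySem.Set.ofList_cons, ih, List.map_cons]
    congr 1
    simp only [PySem.Set.discard, List.filter_map]
    congr 1
    apply List.filter_congr
    intro y _
    have hbe : (f y == f x) = (y == x) := by
      by_cases h : y = x
      · simp [h]
      · have hne : ¬ f y = f x := fun he => h (hf he)
        simp [h, hne]
    simp [Function.comp, hbe]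

lemma pvOfList_sublist (xs : List Char) : (PySem.Set.ofList xs).Sublist xs := by
  induction xs with
  | nil => exact List.Sublist.refl _
  | cons x xs ih =>
    rw [PySem.Set.ofList_cons]
    exact List.Sublist.cons₂ x (List.Sublist.trans List.filter_sublist ih)

lemma pvNot_mem_dropWhile (c : Char) :
    ∀ rest : List Char, rest.Pairwise (· ≤ ·) → (∀ z ∈ rest, c ≤ z) →
      c ∉ rest.dropWhile (fun x => x == c) := by
  intro rest
  induction rest with
  | nil => intro _ _ h; simp at h
  | cons x xs ih =>
    intro hp hb
    by_cases hx : (x == c) = true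
    · rw [show (x :: xs).dropWhile (fun x => x == c) = xs.dropWhile (fun x => x == c) by
        simp [hx]]
      exact ih (List.pairwise_cons.1 hp).2 (fun z hz => hb z (by simp [hz]))
    · rw [show (x :: xs).dropWhile (fun x => x == c) = x :: xs by
        simp [hx]]
      intro hmem
      rcases List.mem_cons.1 hmem with h | h
      · exact hx (by simp [h])
      · have h1 : x ≤ c := (List.pairwise_cons.1 hp).1 c h
        have h2 : c ≤ x := hb x (by simp)
        exact hx (by simp [le_antisymm h1 h2])

-- the grouping scan over a sorted list produces (letter, multiplicity) for each distinct letter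
lemma pvRuns_spec : ∀ l : List Char, l.Pairwise (· ≤ ·) →
    pvRuns l = (PySem.Set.ofList l).map (fun c => (String.ofList [c], (l.count c : Int))) := by
  intro l
  induction l using pvRuns.induct with
  | case1 => intro _; simp [pvRuns]
  | case2 c rest ih =>
    intro hp
    have hpt : rest.Pairwise (· ≤ ·) := (List.pairwise_cons.1 hp).2
    have hball : ∀ z ∈ rest, c ≤ z := (List.pairwise_cons.1 hp).1
    have hcd : c ∉ rest.dropWhile (fun x => x == c) := pvNot_mem_dropWhile c rest hpt hball
    have htw : ∀ x ∈ rest.takeWhile (fun x => x == c), x = c := by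
      intro x hx
      have := List.mem_takeWhile_imp (p := fun x => x == c) hx
      exact eq_of_beq (by simpa using this)
    have hsplit : rest.takeWhile (fun x => x == c) ++ rest.dropWhile (fun x => x == c) = rest :=
      List.takeWhile_append_dropWhile
    have hdp : (rest.dropWhile (fun x => x == c)).Pairwise (· ≤ ·) :=
      hpt.sublist (List.dropWhile_sublist _)
    -- the set of a sorted list: head, then the set of the tail with the run removed
    have hset : PySem.Set.ofList (c :: rest)
        = c :: PySem.Set.ofList (rest.dropWhile (fun x => x == c)) := by
      rw [PySem.Set.ofList_cons]
      congr 1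
      show List.filter _ _ = _
      rw [show (PySem.Set.ofList rest).filter (fun y => !(y == c))
            = PySem.Set.ofList (rest.filter (fun y => !(y == c))) from (pvOfList_filter _ _).symm]
      congr 1
      rw [← hsplit, List.filter_append]
      rw [List.filter_eq_nil_iff.2 (by intro a ha; simp [htw a ha]),
        List.filter_eq_self.2 (by
          intro a ha
          have : ¬ a = c := fun h => hcd (h ▸ ha)
          simpa using this)]
      simp
    rw [pvRuns, hset, List.map_cons, ih hdp]
    have h1 : rest.count c = (rest.takeWhile (fun x => x == c)).length := by
      conv_lhs => rw [← hsplit]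
      rw [List.count_append, List.count_eq_length.2 (fun b hb => (htw b hb).symm),
        List.count_eq_zero.2 hcd]
      omega
    congr 1
    · -- the head pair: the count of c is 1 + the run length
      congr 1
      rw [List.count_cons_self, h1]
      push_cast
      ring
    · -- the tail pairs: counts in the whole list agree with counts in the remainder
      apply List.map_congr_left
      intro c' hc'
      have hc'mem : c' ∈ rest.dropWhile (fun x => x == c) := by
        have := pvOfList_sublist (rest.dropWhile (fun x => x == c))
        exact this.mem hc'
      have hne : c' ≠ c := fun h => hcd (h ▸ hc'mem)
      have hcount : (c :: rest).count c' = (rest.dropWhile (fun x => x == c)).count c' := by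
        rw [List.count_cons_of_ne hne.symm]
        conv_lhs => rw [← hsplit]
        rw [List.count_append,
          List.count_eq_zero.2 (by intro h; exact hne (htw c' h)), Nat.zero_add]
      rw [hcount]

-- ===== VERDICT (by name: the statement is the Claim_ definition above) =====
theorem count_each_alphabets_spec : Claim_equal_count_each_alphabets := by
  intro lines _
  show count_each_alphabets lines = count_each_alphabets_alt lines
  simp only [count_each_alphabets, count_each_alphabets_alt]
  congr 1
  congr 1
  rw [pvA_dict_eq]
  have hchars : ((lines_to_characters lines).filter PySem.Chars.isalpha).map
      (fun c => String.ofList [PySem.Chars.lowerChar c])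
      = (lines.flatMap (fun line =>
          ((PySem.Str.stripChars line "\n").toList.filter PySem.Chars.isalpha).map
            PySem.Chars.lowerChar)).map (fun c => String.ofList [c]) := by
    simp [lines_to_characters, List.flatMap_singleton', List.filter_flatMap,
      List.map_flatMap, Function.comp_def]
  rw [hchars]
  set L : List Char := lines.flatMap (fun line =>
    ((PySem.Str.stripChars line "\n").toList.filter PySem.Chars.isalpha).map
      PySem.Chars.lowerChar) with hL
  set SL := PySem.List.sorted L (fun c => c) false with hSL
  have hLperm : SL.Perm L := PySem.List.sorted_perm _ _ _
  have hSLsort : SL.Pairwise (· ≤ ·) := by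
    have := PySem.List.sorted_pairwise (xs := L) (key := fun c : Char => c)
    rw [hSL]
    simpa using this
  have hitems : (PySem.Dict.counter (L.map (fun c => String.ofList [c]))).items
      = (PySem.Set.ofList L).map (fun c => (String.ofList [c], (L.count c : Int))) := by
    rw [PySem.Dict.items_counter, pvOfList_map_inj _ pvSingle_inj, List.map_map]
    apply List.map_congr_left
    intro c _
    simp only [Function.comp]
    rw [List.count_map_of_injective _ _ pvSingle_inj]
  have hnd : (((PySem.Dict.counter (L.map (fun c => String.ofList [c]))).items).map
      (fun p => p.1)).Nodup := by
    rw [hitems, List.map_map]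
    exact (PySem.Set.nodup_ofList L).map (fun a b h => pvSingle_inj h)
  rw [pvSorted2_eq_sorted_fst _ hnd, pvRuns_spec _ hSLsort]
  have hmapcong : (PySem.Set.ofList SL).map (fun c => (String.ofList [c], (SL.count c : Int)))
      = (PySem.Set.ofList SL).map (fun c => (String.ofList [c], (L.count c : Int))) :=
    List.map_congr_left (fun c _ => by rw [hLperm.count_eq])
  rw [hmapcong]
  apply PySem.List.sorted_eq_of_perm_of_pairwise_lt
  · rw [hitems]
    have hsets : (PySem.Set.ofList SL).Perm (PySem.Set.ofList L) :=
      (List.perm_ext_iff_of_nodup (PySem.Set.nodup_ofList _) (PySem.Set.nodup_ofList _)).2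
        (fun a => by simp only [PySem.Set.mem_ofList]; exact hLperm.mem_iff)
    exact hsets.map _
  · rw [List.pairwise_map]
    have h1 : (PySem.Set.ofList SL).Pairwise (· ≤ ·) :=
      hSLsort.sublist (pvOfList_sublist SL)
    have h2 : (PySem.Set.ofList SL).Pairwise (· ≠ ·) := PySem.Set.nodup_ofList _
    exact (h1.and h2).imp (fun h => (pvSingle_lt_iff _ _).2 (lt_of_le_of_ne h.1 h.2))
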